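-- pv_equiv track=rewrite | github.com/icey9527/GalaxyAngel-Model-Tool | scn1_to_obj.py | vertex_stride_from_decl
-- ===== SOURCE A (Python) =====
-- def vertex_stride_from_decl(decl: int) -> int:
--     # mirror of sub_10090BDA
--     base_sel = decl & 0x400E
--     base = {
--         0x0002: 12,
--         0x0004: 16,
--         0x0006: 16,
--         0x0008: 20,
--         0x000A: 24,
--         0x000C: 28,
--         0x000E: 32,
--     }.get(base_sel, 0)
--
--     stride = base
--     if decl & 0x10:
--         stride += 12
--     if decl & 0x20:
--         stride += 4
--     if decl & 0x40:
--         stride += 4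
--     if decl & 0x80:
--         stride += 4
--
--     uv_count = (decl >> 8) & 0xF
--     uv_fmt_bits = (decl >> 16) & 0xFFFF
--     if uv_fmt_bits:
--         for _ in range(uv_count):
--             fmt = uv_fmt_bits & 3
--             if fmt == 0:
--                 stride += 8
--             elif fmt == 1:
--                 stride += 12
--             elif fmt == 2:
--                 stride += 16
--             else:
--                 stride += 4
--             uv_fmt_bits >>= 2
--     else:
--         stride += 8 * uv_count
--     return stride
-- ===== SOURCE B (Python) =====
-- def vertex_stride_from_decl(decl: int) -> int:
--     base = {
--         0x0002: 12,
--         0x0004: 16,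
--         0x0006: 16,
--         0x0008: 20,
--         0x000A: 24,
--         0x000C: 28,
--         0x000E: 32,
--     }.get(decl & 0x400E, 0)
--
--     stride = base
--     if decl & 0x10:
--         stride += 12
--     if decl & 0x20:
--         stride += 4
--     if decl & 0x40:
--         stride += 4
--     if decl & 0x80:
--         stride += 4
--
--     uv_count = (decl >> 8) & 0xF
--     # keep only the uv_count low 2-bit format codes; higher codes are ignored
--     m = (decl >> 16) & 0xFFFF & ((1 << (2 * uv_count)) - 1)
--     lo = m & 0x55555555               # channels whose format code has bit0 set
--     hi = m & 0xAAAAAAAA               # channels whose format code has bit1 set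
--     both = m & (m >> 1) & 0x55555555  # channels whose format code is 3
--     # per-channel size: 8 + 4*bit0 + 8*bit1 - 16*[code == 3]  (= 8,12,16,4 for codes 0,1,2,3)
--     return stride + 8 * uv_count + 4 * lo.bit_count() + 8 * hi.bit_count() - 16 * both.bit_count()
-- ===== Notes on version B (the rewrite author's own statement) =====
-- stated objective: alternative
-- what changed: A's sequential per-channel loop (shift the uv bitfield by 2, branch on the code, accumulate) and its separate zero-bitfield branch are replaced by a branch-free bit-parallel (SWAR) computation: mask off the uv_count relevant codes once, extract the bit0-plane, bit1-plane and code==3-plane with constant masks, and combine three popcounts into one weighted sum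
import Mathlib
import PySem

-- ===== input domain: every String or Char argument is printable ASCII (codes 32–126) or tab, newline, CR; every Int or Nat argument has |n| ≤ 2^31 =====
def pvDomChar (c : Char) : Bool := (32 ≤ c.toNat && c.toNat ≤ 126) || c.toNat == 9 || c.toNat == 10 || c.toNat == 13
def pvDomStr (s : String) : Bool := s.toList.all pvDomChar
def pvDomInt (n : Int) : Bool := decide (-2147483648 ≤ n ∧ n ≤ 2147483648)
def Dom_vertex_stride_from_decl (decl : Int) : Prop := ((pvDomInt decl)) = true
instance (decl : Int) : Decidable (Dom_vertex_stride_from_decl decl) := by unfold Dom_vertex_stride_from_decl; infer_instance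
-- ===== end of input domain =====

-- B replaces A's sequential per-channel UV loop (and its separate zero-bitfield branch) by a
-- branch-free bit-parallel (SWAR) computation: three masked bit planes, three popcounts,
-- one weighted sum (objective: alternative).

-- ===== PORT A =====
-- A's per-channel loop: shifts uv_fmt_bits right by 2 each step, adding the size for the low code.
def pvUvLoopA : Nat → Int → Int → Int
  | 0, _, stride => stride
  | n + 1, bits, stride =>
    let fmt := PySem.Int.band bits 3
    let stride :=
      if fmt = 0 then stride + 8
      else if fmt = 1 then stride + 12
      else if fmt = 2 then stride + 16
      else stride + 4
    pvUvLoopA n (bits >>> (2 : Nat)) stride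

def vertex_stride_from_decl (decl : Int) : Int :=
  let base_sel := PySem.Int.band decl 0x400E
  let base := (PySem.Dict.ofList
      [((0x0002 : Int), (12 : Int)), (0x0004, 16), (0x0006, 16), (0x0008, 20),
       (0x000A, 24), (0x000C, 28), (0x000E, 32)]).getD base_sel 0
  let stride := base
  let stride := if PySem.Int.band decl 0x10 ≠ 0 then stride + 12 else stride
  let stride := if PySem.Int.band decl 0x20 ≠ 0 then stride + 4 else stride
  let stride := if PySem.Int.band decl 0x40 ≠ 0 then stride + 4 else stride
  let stride := if PySem.Int.band decl 0x80 ≠ 0 then stride + 4 else stride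
  let uv_count := PySem.Int.band (decl >>> (8 : Nat)) 0xF
  let uv_fmt_bits := PySem.Int.band (decl >>> (16 : Nat)) 0xFFFF
  if uv_fmt_bits ≠ 0 then pvUvLoopA uv_count.toNat uv_fmt_bits stride
  else stride + 8 * uv_count

-- ===== PORT B =====
def vertex_stride_from_decl_alt (decl : Int) : Int :=
  let base := (PySem.Dict.ofList
      [((0x0002 : Int), (12 : Int)), (0x0004, 16), (0x0006, 16), (0x0008, 20),
       (0x000A, 24), (0x000C, 28), (0x000E, 32)]).getD (PySem.Int.band decl 0x400E) 0
  let stride := base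
  let stride := if PySem.Int.band decl 0x10 ≠ 0 then stride + 12 else stride
  let stride := if PySem.Int.band decl 0x20 ≠ 0 then stride + 4 else stride
  let stride := if PySem.Int.band decl 0x40 ≠ 0 then stride + 4 else stride
  let stride := if PySem.Int.band decl 0x80 ≠ 0 then stride + 4 else stride
  let uv_count := PySem.Int.band (decl >>> (8 : Nat)) 0xF
  -- Python '1 << (2 * uv_count)': the shift amount is nonnegative (uv_count comes from '& 0xF'),
  -- so '.toNat' on it is exact
  let m := PySem.Int.band (PySem.Int.band (decl >>> (16 : Nat)) 0xFFFF)
      ((1 : Int) <<< (2 * uv_count).toNat - 1)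
  let lo := PySem.Int.band m 0x55555555
  let hi := PySem.Int.band m 0xAAAAAAAA
  let both := PySem.Int.band (PySem.Int.band m (m >>> (1 : Nat))) 0x55555555
  -- Python's int.bit_count() is PySem.Int.bitCount
  stride + 8 * uv_count + 4 * (PySem.Int.bitCount lo : Int)
    + 8 * (PySem.Int.bitCount hi : Int) - 16 * (PySem.Int.bitCount both : Int)

-- ===== PRECONDITION & SPEC =====
def Spec_vertex_stride_from_decl (decl : Int) (out : Int) : Prop := out = vertex_stride_from_decl_alt decl
instance (decl : Int) (out : Int) : Decidable (Spec_vertex_stride_from_decl decl out) := by unfold Spec_vertex_stride_from_decl; infer_instance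

-- ===== CLAIM (what is proved, stated in full; the proofs are below) =====
def Claim_equal_vertex_stride_from_decl : Prop := ∀ (decl : Int), Dom_vertex_stride_from_decl decl → Spec_vertex_stride_from_decl decl (vertex_stride_from_decl decl)

-- ===== LEMMAS AND PROOFS =====

-- popcount of a natural number, as an Int, via PySem's bitCount
def pvPC (M : Nat) : Int := (PySem.Int.bitCount (M : Int) : Int)

-- weight of one uv format code
def pvW (r : Nat) : Int := if r = 0 then 8 else if r = 1 then 12 else if r = 2 then 16 else 4

-- sum of the weights of the low n 2-bit codes of M
def pvSN : Nat → Nat → Int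
  | 0, _ => 0
  | n + 1, M => pvW (M % 4) + pvSN n (M / 4)

lemma pv_band_nonneg_le (a b : Int) (hb : 0 ≤ b) :
    0 ≤ PySem.Int.band a b ∧ PySem.Int.band a b ≤ b := by
  unfold PySem.Int.band
  by_cases h1 : 0 ≤ a
  · rw [if_pos h1, if_pos hb]
    refine ⟨by positivity, ?_⟩
    calc ((a.toNat &&& b.toNat : Nat) : Int) ≤ (b.toNat : Int) := by
          exact_mod_cast Nat.and_le_right
      _ = b := Int.toNat_of_nonneg hb
  · rw [if_neg h1, if_pos hb]
    refine ⟨by positivity, ?_⟩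
    calc ((b.toNat - (b.toNat &&& (-a - 1).toNat) : Nat) : Int) ≤ (b.toNat : Int) := by
          exact_mod_cast Nat.sub_le _ _
      _ = b := Int.toNat_of_nonneg hb

-- A's loop equals the weight sum over the low codes (for a nonnegative bitfield)
lemma pvUvLoopA_eq (n : Nat) : ∀ (N : Nat) (stride : Int),
    pvUvLoopA n (N : Int) stride = stride + pvSN n N := by
  induction n with
  | zero => intro N stride; simp [pvUvLoopA, pvSN]
  | succ n ih =>
    intro N stride
    have hband : PySem.Int.band (N : Int) 3 = ((N % 4 : Nat) : Int) := by
      rw [show ((3 : Int)) = ((3 : Nat) : Int) from rfl, PySem.Int.band_natCast]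
      norm_num [Nat.and_two_pow_sub_one_eq_mod N 2]
    have hshift : ((N : Int) >>> (2 : Nat)) = ((N / 4 : Nat) : Int) := by
      rw [show ((N : Int) >>> (2 : Nat)) = ((N >>> 2 : Nat) : Int) from rfl,
        Nat.shiftRight_eq_div_pow]
    show pvUvLoopA n ((N : Int) >>> (2 : Nat))
        (if PySem.Int.band (N : Int) 3 = 0 then stride + 8
         else if PySem.Int.band (N : Int) 3 = 1 then stride + 12
         else if PySem.Int.band (N : Int) 3 = 2 then stride + 16
         else stride + 4) = stride + pvSN (n + 1) N
    rw [hshift, ih, hband]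
    show _ = stride + (pvW (N % 4) + pvSN n (N / 4))
    have h4 : N % 4 < 4 := Nat.mod_lt _ (by norm_num)
    unfold pvW
    interval_cases h : N % 4 <;> norm_num [add_assoc]

-- the loop only reads the low n codes
lemma pvSN_mod (n : Nat) : ∀ (N : Nat), pvSN n (N % 4 ^ n) = pvSN n N := by
  induction n with
  | zero => intro N; rfl
  | succ n ih =>
    intro N
    show pvW (N % 4 ^ (n + 1) % 4) + pvSN n (N % 4 ^ (n + 1) / 4)
        = pvW (N % 4) + pvSN n (N / 4)
    have h1 : N % 4 ^ (n + 1) % 4 = N % 4 :=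
      Nat.mod_mod_of_dvd N (dvd_pow_self 4 (Nat.succ_ne_zero n))
    have h2 : N % 4 ^ (n + 1) / 4 = N / 4 % 4 ^ n := by
      rw [pow_succ, mul_comm, Nat.mod_mul_right_div_self]
    rw [h1, h2, ih]

-- popcount splits off the low 2 bits
lemma pvPC_four_mul_add (q e : Nat) (he : e < 4) : pvPC (4 * q + e) = pvPC q + pvPC e := by
  unfold pvPC
  by_cases h0 : 4 * q + e = 0
  · have hq : q = 0 := by omega
    have he0 : e = 0 := by omega
    simp [hq, he0]
  · rw [PySem.Int.bitCount_natCast (by omega : 0 < 4 * q + e)]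
    have hm : (4 * q + e) % 2 = e % 2 := by omega
    have hd : (4 * q + e) / 2 = 2 * q + e / 2 := by omega
    rw [hm, hd]
    by_cases h1 : 2 * q + e / 2 = 0
    · have hq : q = 0 := by omega
      subst hq
      rw [h1]
      interval_cases e <;> simp_all <;> decide
    · rw [PySem.Int.bitCount_natCast (by omega : 0 < 2 * q + e / 2)]
      have hm2 : (2 * q + e / 2) % 2 = e / 2 % 2 := by omega
      have hd2 : (2 * q + e / 2) / 2 = q := by omega
      rw [hm2, hd2]
      have hbc : PySem.Int.bitCount (e : Int) = e % 2 + e / 2 % 2 := by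
        interval_cases e <;> decide
      rw [hbc]
      push_cast
      ring

-- test bits of the two masks
lemma pv_testBit_LO (i : Nat) :
    (0x55555555 : Nat).testBit i = (decide (i % 2 = 0) && decide (i < 32)) := by
  rcases Nat.lt_or_ge i 32 with h | h
  · interval_cases i <;> decide
  · have hlt : (0x55555555 : Nat) < 2 ^ i :=
      lt_of_lt_of_le (by norm_num) (Nat.pow_le_pow_right (by norm_num) h)
    simp [Nat.testBit_lt_two_pow hlt, show ¬ i < 32 by omega]

lemma pv_testBit_HI (i : Nat) :
    (0xAAAAAAAA : Nat).testBit i = (decide (i % 2 = 1) && decide (i < 32)) := by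
  rcases Nat.lt_or_ge i 32 with h | h
  · interval_cases i <;> decide
  · have hlt : (0xAAAAAAAA : Nat) < 2 ^ i :=
      lt_of_lt_of_le (by norm_num) (Nat.pow_le_pow_right (by norm_num) h)
    simp [Nat.testBit_lt_two_pow hlt, show ¬ i < 32 by omega]

lemma pv_testBit_four_mul_add (q e j : Nat) (he : e < 4) :
    (4 * q + e).testBit j = if j < 2 then e.testBit j else q.testBit (j - 2) := by
  have h := Nat.testBit_two_pow_mul_add q (i := 2) (b := e) (by omega) j
  simpa using h

-- the three bit-plane split lemmas (q below 2^28 so the 32-bit masks have room)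
lemma pv_split_LO (q e : Nat) (he : e < 4) (hq : q < 2 ^ 28) :
    (4 * q + e) &&& 0x55555555 = 4 * (q &&& 0x55555555) + (e &&& 1) := by
  have hlt : e &&& 1 < 4 := lt_of_le_of_lt Nat.and_le_right (by norm_num)
  apply Nat.eq_of_testBit_eq
  intro j
  rw [Nat.testBit_land, pv_testBit_four_mul_add q e j he,
    pv_testBit_four_mul_add (q &&& 0x55555555) (e &&& 1) j hlt, pv_testBit_LO]
  by_cases hj : j < 2
  · interval_cases j
    · simp
    · have h1f : (e % 2).testBit 1 = false := Nat.testBit_lt_two_pow (by omega)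
      simp [h1f]
  · rw [if_neg hj, if_neg hj, Nat.testBit_land, pv_testBit_LO]
    by_cases hq2 : j - 2 < 28
    · have h1 : (j % 2 = 0) ↔ ((j - 2) % 2 = 0) := by omega
      have h2 : j < 32 ↔ (j - 2) < 32 := by omega
      simp [h1, h2]
    · have hz : q.testBit (j - 2) = false :=
        Nat.testBit_lt_two_pow (lt_of_lt_of_le hq (Nat.pow_le_pow_right (by norm_num) (by omega)))
      simp [hz]

lemma pv_split_HI (q e : Nat) (he : e < 4) (hq : q < 2 ^ 28) :
    (4 * q + e) &&& 0xAAAAAAAA = 4 * (q &&& 0xAAAAAAAA) + (e &&& 2) := by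
  have hlt : e &&& 2 < 4 := lt_of_le_of_lt Nat.and_le_right (by norm_num)
  apply Nat.eq_of_testBit_eq
  intro j
  rw [Nat.testBit_land, pv_testBit_four_mul_add q e j he,
    pv_testBit_four_mul_add (q &&& 0xAAAAAAAA) (e &&& 2) j hlt, pv_testBit_HI]
  by_cases hj : j < 2
  · interval_cases j
    · simp
    · simp [show Nat.testBit 2 1 = true from rfl]
  · rw [if_neg hj, if_neg hj, Nat.testBit_land, pv_testBit_HI]
    by_cases hq2 : j - 2 < 28
    · have h1 : (j % 2 = 1) ↔ ((j - 2) % 2 = 1) := by omega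
      have h2 : j < 32 ↔ (j - 2) < 32 := by omega
      simp [h1, h2]
    · have hz : q.testBit (j - 2) = false :=
        Nat.testBit_lt_two_pow (lt_of_lt_of_le hq (Nat.pow_le_pow_right (by norm_num) (by omega)))
      simp [hz]

lemma pv_split_BOTH (q e : Nat) (he : e < 4) (hq : q < 2 ^ 28) :
    (4 * q + e) &&& ((4 * q + e) >>> 1) &&& 0x55555555
      = 4 * (q &&& (q >>> 1) &&& 0x55555555) + (if e = 3 then 1 else 0) := by
  have hlt : (if e = 3 then 1 else 0) < 4 := by split_ifs <;> norm_num
  apply Nat.eq_of_testBit_eq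
  intro j
  rw [Nat.testBit_land, Nat.testBit_land, Nat.testBit_shiftRight,
    pv_testBit_four_mul_add q e j he, pv_testBit_four_mul_add q e (1 + j) he,
    pv_testBit_four_mul_add (q &&& (q >>> 1) &&& 0x55555555) _ j hlt, pv_testBit_LO]
  by_cases hj : j < 2
  · interval_cases j
    · simp only [if_pos (show (0 : Nat) < 2 by norm_num),
        if_pos (show (1 : Nat) + 0 < 2 by norm_num)]
      interval_cases e <;> decide
    · have h1f : (if e = 3 then 1 else 0).testBit 1 = false :=
        Nat.testBit_lt_two_pow (show (if e = 3 then 1 else 0) < 2 ^ 1 by split_ifs <;> norm_num)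
      simp [h1f]
  · simp only [if_neg hj, if_neg (show ¬ 1 + j < 2 by omega)]
    rw [Nat.testBit_land, Nat.testBit_land, Nat.testBit_shiftRight, pv_testBit_LO]
    have hj1 : 1 + j - 2 = 1 + (j - 2) := by omega
    rw [hj1]
    by_cases hq2 : j - 2 < 28
    · have h1 : (j % 2 = 0) ↔ ((j - 2) % 2 = 0) := by omega
      have h2 : j < 32 ↔ (j - 2) < 32 := by omega
      simp [h1, h2]
    · have hz : q.testBit (j - 2) = false :=
        Nat.testBit_lt_two_pow (lt_of_lt_of_le hq (Nat.pow_le_pow_right (by norm_num) (by omega)))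
      simp [hz]

-- the key lemma: the weight sum over n ≤ 15 codes of the masked field equals the SWAR formula
lemma pv_key (n : Nat) (hn : n ≤ 15) : ∀ M : Nat, M < 4 ^ n →
    pvSN n M = 8 * n + 4 * pvPC (M &&& 0x55555555) + 8 * pvPC (M &&& 0xAAAAAAAA)
      - 16 * pvPC (M &&& (M >>> 1) &&& 0x55555555) := by
  induction n with
  | zero =>
    intro M hM
    have hM0 : M = 0 := by simpa using hM
    subst hM0
    show (0 : Int) = _
    norm_num [pvPC]
  | succ n ih =>
    intro M hM
    have he : M % 4 < 4 := Nat.mod_lt _ (by norm_num)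
    have hMqe : M = 4 * (M / 4) + M % 4 := by omega
    have hq : M / 4 < 4 ^ n := by
      have h4 : M < 4 * 4 ^ n := by
        calc M < 4 ^ (n + 1) := hM
          _ = 4 * 4 ^ n := by ring
      omega
    have hq28 : M / 4 < 2 ^ 28 := by
      calc M / 4 < 4 ^ n := hq
        _ ≤ 4 ^ 14 := Nat.pow_le_pow_right (by norm_num) (by omega)
        _ ≤ 2 ^ 28 := by norm_num
    have hSN : pvSN (n + 1) M = pvW (M % 4) + pvSN n (M / 4) := rfl
    rw [hSN, ih (by omega) (M / 4) hq]
    conv_lhs => rw [show pvW (M % 4) = 8 + 4 * pvPC (M % 4 &&& 1) + 8 * pvPC (M % 4 &&& 2)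
      - 16 * pvPC (if M % 4 = 3 then 1 else 0) from by interval_cases h : M % 4 <;> decide]
    conv_rhs => rw [hMqe, pv_split_LO _ _ he hq28, pv_split_HI _ _ he hq28,
      pv_split_BOTH _ _ he hq28,
      pvPC_four_mul_add _ _ (lt_of_le_of_lt Nat.and_le_right (by norm_num)),
      pvPC_four_mul_add _ _ (lt_of_le_of_lt Nat.and_le_right (by norm_num)),
      pvPC_four_mul_add _ _ (show (if M % 4 = 3 then 1 else 0) < 4 by split_ifs <;> norm_num)]
    push_cast
    ring

-- the whole UV part, parameterised by the shared stride/uv_count/bitfield values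
lemma pv_main (stride uvc bits : Int) (huv0 : 0 ≤ uvc) (huv : uvc ≤ 15)
    (hb0 : 0 ≤ bits) :
    (if bits ≠ 0 then pvUvLoopA uvc.toNat bits stride else stride + 8 * uvc)
    = stride + 8 * uvc
      + 4 * (PySem.Int.bitCount (PySem.Int.band
          (PySem.Int.band bits ((1 : Int) <<< (2 * uvc).toNat - 1)) 0x55555555) : Int)
      + 8 * (PySem.Int.bitCount (PySem.Int.band
          (PySem.Int.band bits ((1 : Int) <<< (2 * uvc).toNat - 1)) 0xAAAAAAAA) : Int)
      - 16 * (PySem.Int.bitCount (PySem.Int.band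
          (PySem.Int.band (PySem.Int.band bits ((1 : Int) <<< (2 * uvc).toNat - 1))
            (PySem.Int.band bits ((1 : Int) <<< (2 * uvc).toNat - 1) >>> (1 : Nat)))
          0x55555555) : Int) := by
  obtain ⟨N, rfl⟩ : ∃ N : Nat, bits = (N : Int) := ⟨bits.toNat, (Int.toNat_of_nonneg hb0).symm⟩
  obtain ⟨n, rfl⟩ : ∃ n : Nat, uvc = (n : Int) := ⟨uvc.toNat, (Int.toNat_of_nonneg huv0).symm⟩
  have hn : n ≤ 15 := by exact_mod_cast huv
  have hk : (2 * ((n : Nat) : Int)).toNat = 2 * n := by omega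
  rw [hk]
  have hone : ((1 : Int) <<< (2 * n) - 1) = (((2 ^ (2 * n) - 1 : Nat)) : Int) := by
    rw [show ((1 : Int) <<< (2 * n)) = (((1 <<< (2 * n) : Nat)) : Int) from rfl,
      Nat.shiftLeft_eq, one_mul]
    have h1 : (1 : Nat) ≤ 2 ^ (2 * n) := Nat.one_le_two_pow
    push_cast [h1]
    ring
  rw [hone]
  have hm : PySem.Int.band (N : Int) (((2 ^ (2 * n) - 1 : Nat)) : Int)
      = ((N % 4 ^ n : Nat) : Int) := by
    rw [PySem.Int.band_natCast, Nat.and_two_pow_sub_one_eq_mod]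
    congr 2
    rw [pow_mul]
    norm_num
  rw [hm]
  have hshift : (((N % 4 ^ n : Nat) : Int)) >>> (1 : Nat) = (((N % 4 ^ n) >>> 1 : Nat) : Int) := by
    rw [← Int.natCast_shiftRight]
  rw [hshift]
  rw [show ((0x55555555 : Int)) = (((0x55555555 : Nat)) : Int) from rfl,
    show ((0xAAAAAAAA : Int)) = (((0xAAAAAAAA : Nat)) : Int) from rfl,
    PySem.Int.band_natCast, PySem.Int.band_natCast, PySem.Int.band_natCast,
    PySem.Int.band_natCast]
  have hM : N % 4 ^ n < 4 ^ n := Nat.mod_lt _ (by positivity)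
  by_cases hNz : N = 0
  · subst hNz
    rw [if_neg (by simp)]
    norm_num
  · rw [if_pos (by exact_mod_cast hNz), show (((n : Nat) : Int)).toNat = n from Int.toNat_natCast n,
      pvUvLoopA_eq n N stride, ← pvSN_mod n N, pv_key n hn (N % 4 ^ n) hM]
    unfold pvPC
    push_cast
    ring

-- ===== VERDICT (by name: the statement is the Claim_ definition above) =====
theorem vertex_stride_from_decl_spec : Claim_equal_vertex_stride_from_decl := by
  intro decl _
  show vertex_stride_from_decl decl = vertex_stride_from_decl_alt decl
  unfold vertex_stride_from_decl vertex_stride_from_decl_alt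
  dsimp only
  exact pv_main _ _ _
    (pv_band_nonneg_le (decl >>> (8 : Nat)) 0xF (by norm_num)).1
    (pv_band_nonneg_le (decl >>> (8 : Nat)) 0xF (by norm_num)).2
    (pv_band_nonneg_le (decl >>> (16 : Nat)) 0xFFFF (by norm_num)).1
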